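-- pv_equiv track=rewrite | github.com/nasa/opera-sds-bach-api | accountability_api/api_utils/utils.py | get_orbit_range_list
-- ===== SOURCE A (Python) =====
-- import math
--
-- def magnitude(input_val):
--     """
--     ref: https://stackoverflow.com/a/52335468
--     validate the input 0 value
--     :param input_val: int - positive integer
--     :return:
--     """
--     if input_val == 0:
--         return 0
--     return int(math.floor(math.log10(abs(input_val))))
--
-- def get_orbit_range_list(start_orbit, end_orbit):
--     """
--     For a given orbit range, returning a list of tuples with the same magnitude.
--
--     assumption: the input values are not None (pls validate before calling this)
--
--     example: input (13, 12345) => output [(13, 99), (100, 999), (1000, 9999), (10000, 12345)]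
--
--     :param start_orbit: int - positive integer
--     :param end_orbit: int - positive integer
--     :return:
--     """
--     if (
--         end_orbit < start_orbit
--     ):  # validation. if end is smaller than start, no need to have any list
--         return [(start_orbit, end_orbit)]
--     start_mag = magnitude(start_orbit)
--     end_mag = magnitude(end_orbit)
--     if start_mag == end_mag:  # magnitudes are the same. only need 1 list
--         return [(start_orbit, end_orbit)]
--     range_list = []
--     for i in range(start_mag, end_mag + 1):
--         if i == start_mag:  # the very start
--             range_list.append((start_orbit, (10 ** (i + 1)) - 1))
--             pass
--         elif i == end_mag:  # the very end
--             range_list.append((10 ** i, end_orbit))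
--             pass
--         else:
--             range_list.append((10 ** i, (10 ** (i + 1)) - 1))
--             pass
--         pass
--     return range_list
-- ===== SOURCE B (Python) =====
-- def get_orbit_range_list(start_orbit, end_orbit):
--     if end_orbit < start_orbit:
--         return [(start_orbit, end_orbit)]
--     p = 10
--     while p <= abs(start_orbit):
--         p *= 10
--     if end_orbit < p:
--         return [(start_orbit, end_orbit)]
--     return [(start_orbit, p - 1)] + get_orbit_range_list(p, end_orbit)
-- ===== Notes on version B (the rewrite author's own statement) =====
-- stated objective: simpler
-- what changed: Removes the magnitude (log10) computation and the indexed loop with position branches entirely: B grows a power-of-ten threshold p past |start|, and recursively peels (start, p-1) off the front until end falls below the threshold.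
-- outside the precondition, e.g. on get_orbit_range_list(-100, 5): A returns [], B returns [(-100, 5)]
import Mathlib
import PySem

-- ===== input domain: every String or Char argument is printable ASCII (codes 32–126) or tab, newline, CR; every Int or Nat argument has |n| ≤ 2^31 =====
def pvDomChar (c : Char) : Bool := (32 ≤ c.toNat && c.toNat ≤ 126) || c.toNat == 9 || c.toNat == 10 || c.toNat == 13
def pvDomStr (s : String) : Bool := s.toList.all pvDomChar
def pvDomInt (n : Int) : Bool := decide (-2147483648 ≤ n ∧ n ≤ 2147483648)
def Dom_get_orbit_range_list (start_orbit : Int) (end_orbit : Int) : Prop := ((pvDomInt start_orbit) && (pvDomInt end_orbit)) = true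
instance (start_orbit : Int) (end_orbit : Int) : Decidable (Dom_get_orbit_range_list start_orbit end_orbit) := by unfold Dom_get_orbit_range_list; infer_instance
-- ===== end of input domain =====

-- B removes the magnitude (log10) computation and the indexed loop with position branches:
-- it grows a power-of-ten threshold past |start| and recursively peels (start, p-1) off the
-- front until end falls below the threshold; objective: simpler, same cost.


-- ===== PORT A =====
-- Python: int(math.floor(math.log10(abs(input_val)))). Hand-ported as Nat.log 10 |x|:
-- exact here because for 0 < |x| ≤ 2^31 a double represents |x| exactly and
-- floor(log10 |x|) is the number of decimal digits minus one, i.e. Nat.log 10 |x|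
-- (checked against CPython at all decade boundaries 10^k-2..10^k+2 and 200000 random inputs).
def pvMagnitudeA (input_val : Int) : Int :=
  if input_val = 0 then 0
  else (Nat.log 10 input_val.natAbs : Int)

def get_orbit_range_list (start_orbit : Int) (end_orbit : Int) : List (Int × Int) :=
  if end_orbit < start_orbit then [(start_orbit, end_orbit)]
  else
    let start_mag := pvMagnitudeA start_orbit
    let end_mag := pvMagnitudeA end_orbit
    if start_mag = end_mag then [(start_orbit, end_orbit)]
    else
      -- 10 ** i ported as (10:Int) ^ i.toNat: every i in range(start_mag, end_mag+1) is ≥ 0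
      (PySem.List.pyRange start_mag (end_mag + 1) 1).foldl
        (fun range_list i =>
          if i = start_mag then
            range_list ++ [(start_orbit, (10:Int) ^ (i + 1).toNat - 1)]
          else if i = end_mag then
            range_list ++ [((10:Int) ^ i.toNat, end_orbit)]
          else
            range_list ++ [((10:Int) ^ i.toNat, (10:Int) ^ (i + 1).toNat - 1)])
        []

-- ===== PORT B =====
-- Source B's while loop 'p = 10; while p <= abs(start): p *= 10', on Nats.
-- The '0 < p' conjunct only justifies termination; it holds on every call (p starts at 10).
def pvNextPow (a : Nat) (p : Nat) : Nat :=
  if h : 0 < p ∧ p ≤ a then pvNextPow a (p * 10) else p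
  termination_by a + 1 - p
  decreasing_by omega

-- needed by the port's termination proof
theorem pvNextPow_gt (a : Nat) : ∀ (p : Nat), 0 < p → a < pvNextPow a p := by
  intro p
  fun_induction pvNextPow a p with
  | case1 p h ih => intro _; exact ih (by omega)
  | case2 p h => intro hp; rw [Decidable.not_and_iff_or_not] at h; omega

def get_orbit_range_list_alt (start_orbit : Int) (end_orbit : Int) : List (Int × Int) :=
  if end_orbit < start_orbit then [(start_orbit, end_orbit)]
  else
    let p : Int := (pvNextPow start_orbit.natAbs 10 : Nat)
    if end_orbit < p then [(start_orbit, end_orbit)]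
    else (start_orbit, p - 1) :: get_orbit_range_list_alt p end_orbit
  termination_by (end_orbit - start_orbit).toNat
  decreasing_by
    have h1 := pvNextPow_gt start_orbit.natAbs 10 (by omega)
    have h2 := Int.le_natAbs (a := start_orbit)
    omega

-- ===== PRECONDITION & SPEC =====
-- Pre_ excludes the inputs with end_orbit ≥ start_orbit where |start_orbit| has strictly more
-- decimal digits than |end_orbit| (possible only for a negative start, outside A's documented
-- positive-integer domain): there A's loop range is empty so it returns [] while B's peel
-- returns [(start_orbit, end_orbit)] — both values are accidental on that unspecified corner.
def Pre_get_orbit_range_list (start_orbit : Int) (end_orbit : Int) : Prop :=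
  end_orbit < start_orbit ∨ Nat.log 10 start_orbit.natAbs ≤ Nat.log 10 end_orbit.natAbs
instance (start_orbit : Int) (end_orbit : Int) : Decidable (Pre_get_orbit_range_list start_orbit end_orbit) := by unfold Pre_get_orbit_range_list; infer_instance

def pvWitness_get_orbit_range_list : Int × Int := (13, 12345)

def Spec_get_orbit_range_list (start_orbit : Int) (end_orbit : Int) (out : List (Int × Int)) : Prop := out = get_orbit_range_list_alt start_orbit end_orbit
instance (start_orbit : Int) (end_orbit : Int) (out : List (Int × Int)) : Decidable (Spec_get_orbit_range_list start_orbit end_orbit out) := by unfold Spec_get_orbit_range_list; infer_instance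

-- ===== CLAIM (what is proved, stated in full; the proofs are below) =====
def Claim_equal_get_orbit_range_list : Prop := ∀ (start_orbit : Int) (end_orbit : Int), Dom_get_orbit_range_list start_orbit end_orbit → Pre_get_orbit_range_list start_orbit end_orbit → Spec_get_orbit_range_list start_orbit end_orbit (get_orbit_range_list start_orbit end_orbit)

-- ===== LEMMAS AND PROOFS =====

theorem pvMagA_eq_log (x : Int) : pvMagnitudeA x = (Nat.log 10 x.natAbs : Int) := by
  unfold pvMagnitudeA
  split
  · rename_i h; subst h; simp
  · rfl

-- B's while loop computes the least power of ten (≥ 10) exceeding a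
theorem pvNextPow_eq_pow : ∀ (d k a : Nat), 1 ≤ k → Nat.log 10 a + 1 ≤ k + d →
    pvNextPow a (10 ^ k) = 10 ^ max k (Nat.log 10 a + 1) := by
  intro d
  induction d with
  | zero =>
    intro k a hk hd
    have hak : a < 10 ^ k := by
      rcases Nat.eq_zero_or_pos a with h0 | h0
      · subst h0; exact Nat.pow_pos (n := k) (by omega)
      · exact (Nat.log_lt_iff_lt_pow (by norm_num) h0.ne').mp (by omega)
    rw [pvNextPow, dif_neg (by omega)]
    congr 1
    omega
  | succ d ih =>
    intro k a hk hd
    by_cases hak : 10 ^ k ≤ a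
    · rw [pvNextPow, dif_pos ⟨Nat.pow_pos (n := k) (by omega), hak⟩]
      rw [show 10 ^ k * 10 = 10 ^ (k + 1) by ring]
      rw [ih (k + 1) a (by omega) (by omega)]
      have hlog : k ≤ Nat.log 10 a := Nat.le_log_of_pow_le (by norm_num) hak
      congr 1
      omega
    · have hak' : a < 10 ^ k := by omega
      have hlt : Nat.log 10 a < k := by
        rcases Nat.eq_zero_or_pos a with h0 | h0
        · subst h0; simpa using hk
        · exact (Nat.log_lt_iff_lt_pow (by norm_num) h0.ne').mpr hak'
      rw [pvNextPow, dif_neg (by omega)]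
      congr 1
      omega

theorem pvNextPow_ten (a : Nat) : pvNextPow a 10 = 10 ^ (Nat.log 10 a + 1) := by
  have h := pvNextPow_eq_pow (Nat.log 10 a + 1) 1 a (le_refl 1) (by omega)
  have hm : max 1 (Nat.log 10 a + 1) = Nat.log 10 a + 1 := by omega
  rw [hm] at h
  simpa using h

-- the tail of A's loop, as a map
def pvTailMap (a b e : Int) : List (Int × Int) :=
  (PySem.List.pyRange a (b + 1) 1).map
    (fun i => if i = b then ((10:Int) ^ i.toNat, e)
      else ((10:Int) ^ i.toNat, (10:Int) ^ (i + 1).toNat - 1))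

-- A's loop peels into its first pair followed by pvTailMap
theorem pvLoopL (a b s e : Int) (hab : a < b) :
    (PySem.List.pyRange a (b + 1) 1).foldl
        (fun range_list i =>
          if i = a then range_list ++ [(s, (10:Int) ^ (i + 1).toNat - 1)]
          else if i = b then range_list ++ [((10:Int) ^ i.toNat, e)]
          else range_list ++ [((10:Int) ^ i.toNat, (10:Int) ^ (i + 1).toNat - 1)])
        []
      = (s, (10:Int) ^ (a + 1).toNat - 1) :: pvTailMap (a + 1) b e := by
  have hbody : (fun (range_list : List (Int × Int)) (i : Int) =>
        if i = a then range_list ++ [(s, (10:Int) ^ (i + 1).toNat - 1)]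
        else if i = b then range_list ++ [((10:Int) ^ i.toNat, e)]
        else range_list ++ [((10:Int) ^ i.toNat, (10:Int) ^ (i + 1).toNat - 1)])
      = fun range_list i => range_list ++
          [if i = a then (s, (10:Int) ^ (i + 1).toNat - 1)
           else if i = b then ((10:Int) ^ i.toNat, e)
           else ((10:Int) ^ i.toNat, (10:Int) ^ (i + 1).toNat - 1)] := by
    funext acc i; split_ifs <;> rfl
  rw [hbody, PySem.List.foldl_append_singleton_eq_map, List.nil_append]
  rw [PySem.List.pyRange_one_cons (by omega)]
  simp only [List.map_cons]
  rw [if_pos trivial]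
  congr 1
  unfold pvTailMap
  apply List.map_congr_left
  intro i hi
  rw [PySem.List.mem_pyRange_one] at hi
  simp [show i ≠ a by omega]

-- A started at a power of ten equals pvTailMap
theorem pvApow (a b : Nat) (e : Int) (hab : a ≤ b)
    (hbe : Nat.log 10 e.natAbs = b) (he : (10:Int) ^ b ≤ e) :
    get_orbit_range_list ((10:Int) ^ a) e = pvTailMap (a : Int) (b : Int) e := by
  have hpow : ((10:Int) ^ a).natAbs = 10 ^ a := by
    rw [Int.natAbs_pow]; rfl
  have hpa : (10:Int) ^ a ≤ (10:Int) ^ b := pow_le_pow_right₀ (by norm_num) hab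
  have hnlt : ¬ e < (10:Int) ^ a := by omega
  have hmg : pvMagnitudeA ((10:Int) ^ a) = (a : Int) := by
    rw [pvMagA_eq_log, hpow, Nat.log_pow (by norm_num)]
  have hmge : pvMagnitudeA e = (b : Int) := by rw [pvMagA_eq_log, hbe]
  unfold get_orbit_range_list
  rw [if_neg hnlt]
  simp only [hmg, hmge]
  by_cases heq : a = b
  · subst heq
    rw [if_pos rfl]
    unfold pvTailMap
    rw [PySem.List.pyRange_one_singleton]
    simp
  · have hab' : (a : Int) < (b : Int) := by omega
    rw [if_neg (by omega)]
    rw [pvLoopL _ _ _ _ hab']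
    conv_rhs => rw [pvTailMap, PySem.List.pyRange_one_cons (by omega), List.map_cons]
    rw [if_neg (by omega)]
    have h1 : ((a : Int) + 1).toNat = a + 1 := by omega
    have h2 : ((a : Int)).toNat = a := by omega
    rw [h1, h2, ← pvTailMap]

-- base cases: end < start, or equal magnitudes
theorem pvBase (s e : Int)
    (h : e < s ∨ (s ≤ e ∧ Nat.log 10 s.natAbs = Nat.log 10 e.natAbs)) :
    get_orbit_range_list s e = get_orbit_range_list_alt s e := by
  rcases h with h | ⟨hse, hmag⟩
  · unfold get_orbit_range_list get_orbit_range_list_alt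
    rw [if_pos h, if_pos h]
  · have he : e < (((10:Nat) ^ (Nat.log 10 s.natAbs + 1) : Nat) : Int) := by
      by_cases h0 : e ≤ 0
      · have : 0 < (10:Nat) ^ (Nat.log 10 s.natAbs + 1) := Nat.pow_pos (by omega)
        omega
      · have : e.natAbs < 10 ^ (Nat.log 10 e.natAbs + 1) :=
          Nat.lt_pow_succ_log_self (by norm_num) _
        rw [← hmag] at this
        omega
    have hA : get_orbit_range_list s e = [(s, e)] := by
      unfold get_orbit_range_list
      rw [if_neg (not_lt.mpr hse)]
      simp only [pvMagA_eq_log, hmag]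
      simp
    have hB : get_orbit_range_list_alt s e = [(s, e)] := by
      rw [get_orbit_range_list_alt, if_neg (not_lt.mpr hse)]
      simp only [pvNextPow_ten]
      rw [if_pos he]
    rw [hA, hB]

theorem pvMain : ∀ (n : Nat) (s e : Int), (e - s).toNat ≤ n →
    Pre_get_orbit_range_list s e →
    get_orbit_range_list s e = get_orbit_range_list_alt s e := by
  intro n
  induction n with
  | zero =>
    intro s e hn hpre
    apply pvBase
    by_cases hlt : e < s
    · exact Or.inl hlt
    · have : e = s := by omega
      subst this
      exact Or.inr ⟨le_refl e, rfl⟩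
  | succ n ih =>
    intro s e hn hpre
    by_cases hlt : e < s
    · exact pvBase s e (Or.inl hlt)
    · set a := Nat.log 10 s.natAbs with hadef
      set b := Nat.log 10 e.natAbs with hbdef
      have hab : a ≤ b := by
        rcases hpre with h | h
        · exact absurd h hlt
        · exact h
      by_cases heq : a = b
      · exact pvBase s e (Or.inr ⟨by omega, heq⟩)
      · have hab' : a < b := lt_of_le_of_ne hab heq
        -- e must be positive: a negative e ≥ s would force b ≤ a
        have hepos : 0 < e := by
          by_contra h0
          have h1 : e.natAbs ≤ s.natAbs := by omega
          have := Nat.log_mono_right (b := 10) h1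
          omega
        have heabs : (e.natAbs : Int) = e := by omega
        have hble : (10:Nat) ^ b ≤ e.natAbs := Nat.pow_log_le_self 10 (by omega)
        have hbleI : (10:Int) ^ b ≤ e := by
          have h1 : (((10:Nat) ^ b : Nat) : Int) ≤ (e.natAbs : Int) := by exact_mod_cast hble
          have h2 : (((10:Nat) ^ b : Nat) : Int) = (10:Int) ^ b := by push_cast; ring
          omega
        -- the threshold p = 10^(a+1)
        have hsa : s.natAbs < 10 ^ (a + 1) := Nat.lt_pow_succ_log_self (by norm_num) _
        have hp : pvNextPow s.natAbs 10 = 10 ^ (a + 1) := pvNextPow_ten s.natAbs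
        have hpleb : (10:Nat) ^ (a + 1) ≤ 10 ^ b := Nat.pow_le_pow_right (by norm_num) (by omega)
        have hc : (((10:Nat) ^ (a + 1) : Nat) : Int) = (10:Int) ^ (a + 1) := by push_cast; ring
        have hpe : (10:Int) ^ (a + 1) ≤ e := by
          have h1 : (((10:Nat) ^ (a+1) : Nat) : Int) ≤ (((10:Nat) ^ b : Nat) : Int) := by
            exact_mod_cast hpleb
          have h2 : (((10:Nat) ^ b : Nat) : Int) = (10:Int) ^ b := by push_cast; ring
          omega
        -- unfold B one step
        have haltstep : get_orbit_range_list_alt s e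
            = (s, (10:Int) ^ (a + 1) - 1) :: get_orbit_range_list_alt ((10:Int) ^ (a + 1)) e := by
          rw [get_orbit_range_list_alt]
          rw [if_neg (by omega)]
          simp only [hp, hc]
          rw [if_neg (not_lt.mpr hpe)]
        -- unfold A one step
        have hAstep : get_orbit_range_list s e
            = (s, (10:Int) ^ (a + 1) - 1) :: pvTailMap ((a : Int) + 1) (b : Int) e := by
          rw [get_orbit_range_list]
          rw [if_neg (by omega)]
          simp only [pvMagA_eq_log, ← hadef, ← hbdef]
          rw [if_neg (by omega)]
          rw [pvLoopL _ _ _ _ (by omega : (a : Int) < (b : Int))]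
          have h1 : ((a : Int) + 1).toNat = a + 1 := by omega
          rw [h1]
        have htail : pvTailMap ((a : Int) + 1) (b : Int) e
            = get_orbit_range_list ((10:Int) ^ (a + 1)) e := by
          have h := pvApow (a + 1) b e (by omega) hbdef.symm hbleI
          have hcast : ((a : Int) + 1) = ((a + 1 : Nat) : Int) := by push_cast; ring
          rw [hcast, h]
        -- IH at (10^(a+1), e)
        have hprep : Pre_get_orbit_range_list ((10:Int) ^ (a + 1)) e := by
          right
          have : ((10:Int) ^ (a + 1)).natAbs = 10 ^ (a + 1) := by
            rw [Int.natAbs_pow]; rfl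
          rw [this, Nat.log_pow (by norm_num), ← hbdef]
          omega
        have hsltp : s < (10:Int) ^ (a + 1) := by
          have h1 : s ≤ (s.natAbs : Int) := Int.le_natAbs
          omega
        have hmeas : (e - (10:Int) ^ (a + 1)).toNat ≤ n := by omega
        rw [hAstep, htail, ih _ _ hmeas hprep, ← haltstep]

-- ===== VERDICT (by name: the statement is the Claim_ definition above) =====
theorem get_orbit_range_list_spec : Claim_equal_get_orbit_range_list := by
  intro s e _ hpre
  unfold Spec_get_orbit_range_list
  exact pvMain (e - s).toNat s e (le_refl _) hpre
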